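-- pv_equiv track=rewrite | github.com/tcbegley/advent-of-code | 2018/day02.py | part_1
-- ===== SOURCE A (Python) =====
-- from collections import Counter
--
-- def part_1(codes):
--     n2, n3 = 0, 0
--
--     for code in codes:
--         counts = set(Counter(code).values())
--         if 3 in counts:
--             n3 += 1
--         if 2 in counts:
--             n2 += 1
--
--     return n2 * n3
-- ===== SOURCE B (Python) =====
-- def part_1(codes):
--     n2, n3 = 0, 0
--     for code in codes:
--         # sort the characters and walk consecutive equal runs
--         lens = set()
--         run = 0
--         prev = None
--         for c in sorted(code):
--             if c == prev:
--                 run += 1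
--             else:
--                 if run:
--                     lens.add(run)
--                 prev, run = c, 1
--         if run:
--             lens.add(run)
--         if 2 in lens:
--             n2 += 1
--         if 3 in lens:
--             n3 += 1
--     return n2 * n3
-- ===== Notes on version B (the rewrite author's own statement) =====
-- stated objective: faster
-- what changed: Per code, the Counter hash frequency map is replaced by sorting the characters and walking consecutive equal runs, collecting the set of run lengths instead of the set of counts.
import Mathlib
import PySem

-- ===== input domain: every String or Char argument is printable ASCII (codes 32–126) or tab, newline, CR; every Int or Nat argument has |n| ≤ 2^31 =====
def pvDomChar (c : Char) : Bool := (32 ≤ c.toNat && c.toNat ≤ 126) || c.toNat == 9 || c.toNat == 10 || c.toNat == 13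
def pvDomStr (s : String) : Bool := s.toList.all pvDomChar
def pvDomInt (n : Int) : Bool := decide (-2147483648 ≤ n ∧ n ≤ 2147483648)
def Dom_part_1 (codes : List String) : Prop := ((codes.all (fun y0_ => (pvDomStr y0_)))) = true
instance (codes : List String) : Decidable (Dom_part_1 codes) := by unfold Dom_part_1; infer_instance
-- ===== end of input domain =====

-- B replaces A's per-code Counter frequency map by sorting the characters and walking
-- consecutive equal runs, collecting the set of run lengths (objective: faster, measured).

-- ===== PORT A =====
def part_1 (codes : List String) : Int :=
  let s := codes.foldl (fun (acc : Int × Int) code =>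
    let counts := PySem.Set.ofList (PySem.Dict.counter code.toList).values
    let acc := if (3 : Int) ∈ counts then (acc.1, acc.2 + 1) else acc
    let acc := if (2 : Int) ∈ counts then (acc.1 + 1, acc.2) else acc
    acc) (0, 0)
  s.1 * s.2

-- ===== PORT B =====
-- one step of B's run walk: state is (lens, run, prev)
def runStep (st : PySem.Set Int × Int × Option Char) (c : Char) :
    PySem.Set Int × Int × Option Char :=
  if some c = st.2.2 then (st.1, st.2.1 + 1, st.2.2)
  else ((if st.2.1 ≠ 0 then st.1.add st.2.1 else st.1), 1, some c)

-- B's trailing 'if run: lens.add(run)' after the walk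
def runFinish (st : PySem.Set Int × Int × Option Char) : PySem.Set Int :=
  if st.2.1 ≠ 0 then st.1.add st.2.1 else st.1

-- the set of run lengths of the sorted characters of code
def runLens (code : String) : PySem.Set Int :=
  runFinish ((PySem.List.sorted code.toList (fun c => c) false).foldl runStep
    (PySem.Set.empty, 0, none))

def part_1_alt (codes : List String) : Int :=
  let s := codes.foldl (fun (acc : Int × Int) code =>
    let lens := runLens code
    let acc := if (2 : Int) ∈ lens then (acc.1 + 1, acc.2) else acc
    let acc := if (3 : Int) ∈ lens then (acc.1, acc.2 + 1) else acc
    acc) (0, 0)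
  s.1 * s.2

-- ===== PRECONDITION & SPEC =====
def Spec_part_1 (codes : List String) (out : Int) : Prop := out = part_1_alt codes
instance (codes : List String) (out : Int) : Decidable (Spec_part_1 codes out) := by unfold Spec_part_1; infer_instance

-- ===== CLAIM (what is proved, stated in full; the proofs are below) =====
def Claim_equal_part_1 : Prop := ∀ (codes : List String), Dom_part_1 codes → Spec_part_1 codes (part_1 codes)

-- ===== LEMMAS AND PROOFS =====

-- A's 'k in set(Counter(code).values())' is 'some character occurs exactly k times'.
theorem mem_counter_values_iff (code : String) (k : Int) :
    (k ∈ PySem.Set.ofList (PySem.Dict.counter code.toList).values) ↔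
      ∃ c ∈ code.toList, (code.toList.count c : Int) = k := by
  simp only [PySem.Set.mem_ofList, PySem.Dict.values, PySem.Dict.items_counter,
    List.map_map, List.mem_map, Function.comp]

-- the run walk over a sorted tail, started inside a run of p: the final run-length set
-- holds k iff it was already held, or k extends the current run of p, or k is the
-- count of some later (distinct) character.
theorem runLoop_spec (l : List Char) (hs : l.Pairwise (· ≤ ·))
    (lens : PySem.Set Int) (run : Int) (p : Char) (hrun : 1 ≤ run)
    (hp : ∀ x ∈ l, p ≤ x) (k : Int) :
    (k ∈ runFinish (l.foldl runStep (lens, run, some p))) ↔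
      (k ∈ lens ∨ k = run + (l.count p : Int) ∨
        ∃ c ∈ l, c ≠ p ∧ (l.count c : Int) = k) := by
  induction l generalizing lens run p with
  | nil =>
    simp only [List.foldl_nil, List.count_nil, List.not_mem_nil, Nat.cast_zero, add_zero,
      runFinish]
    rw [if_pos (by omega)]
    simp only [PySem.Set.mem_add]
    constructor
    · rintro (h | rfl)
      · exact Or.inl h
      · exact Or.inr (Or.inl rfl)
    · rintro (h | rfl | ⟨c, hc, _⟩)
      · exact Or.inl h
      · exact Or.inr rfl
      · exact hc.elim
  | cons c t ih =>
    have hst : t.Pairwise (· ≤ ·) := hs.of_cons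
    have hct : ∀ x ∈ t, c ≤ x := fun x hx => List.rel_of_pairwise_cons hs hx
    by_cases hcp : c = p
    · subst hcp
      have hstep : runStep (lens, run, some c) c = (lens, run + 1, some c) := by
        simp [runStep]
      rw [List.foldl_cons, hstep, ih hst lens (run + 1) c (by omega) hct]
      constructor
      · rintro (h | h | ⟨d, hd, hdc, rfl⟩)
        · exact Or.inl h
        · refine Or.inr (Or.inl ?_)
          simp only [List.count_cons_self] at *
          omega
        · exact Or.inr (Or.inr ⟨d, List.mem_cons_of_mem _ hd, hdc,
            by simp [Ne.symm hdc]⟩)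
      · rintro (h | h | ⟨d, hd, hdc, rfl⟩)
        · exact Or.inl h
        · refine Or.inr (Or.inl ?_)
          simp only [List.count_cons_self] at *
          omega
        · rcases List.mem_cons.mp hd with rfl | hd'
          · exact absurd rfl hdc
          · exact Or.inr (Or.inr ⟨d, hd', hdc,
              by simp [Ne.symm hdc]⟩)
    · -- c ≠ p: p < everything in c :: t, so p's run (length run) closes here
      have hpc : p ≤ c := hp c (List.mem_cons_self)
      have hplt : ∀ x ∈ c :: t, ¬ x = p := by
        intro x hx
        rcases List.mem_cons.mp hx with rfl | hx'
        · exact hcp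
        · intro hxp; subst hxp
          exact hcp (le_antisymm (hct x hx') hpc)
      have hsome : ¬ (some c = some p) := by simpa using hcp
      have hstep : runStep (lens, run, some p) c
          = (lens.add run, 1, some c) := by
        simp [runStep, hsome]
        omega
      rw [List.foldl_cons, hstep, ih hst (lens.add run) 1 c (by omega) hct]
      have hcount0 : (c :: t).count p = 0 :=
        List.count_eq_zero.mpr (fun h => hplt p h rfl)
      simp only [hcount0, PySem.Set.mem_add, Nat.cast_zero, add_zero]
      constructor
      · rintro ((h | rfl) | h | ⟨d, hd, hdc, rfl⟩)
        · exact Or.inl h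
        · exact Or.inr (Or.inl rfl)
        · refine Or.inr (Or.inr ⟨c, List.mem_cons_self, hcp, ?_⟩)
          simp only [List.count_cons_self] at *
          omega
        · have hdp := hplt d (List.mem_cons_of_mem _ hd)
          refine Or.inr (Or.inr ⟨d, List.mem_cons_of_mem _ hd, hdp, ?_⟩)
          simp [Ne.symm hdc]
      · rintro (h | rfl | ⟨d, hd, hdp, rfl⟩)
        · exact Or.inl (Or.inl h)
        · exact Or.inl (Or.inr rfl)
        · by_cases hdceq : d = c
          · subst hdceq
            refine Or.inr (Or.inl ?_)
            simp only [List.count_cons_self]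
            omega
          · rcases List.mem_cons.mp hd with rfl | hd'
            · exact absurd rfl hdceq
            · exact Or.inr (Or.inr ⟨d, hd', hdceq,
                by simp [Ne.symm hdceq]⟩)

-- B's per-code run-length set holds k iff some character of code occurs exactly k times
-- (for k ≥ 1, which covers 2 and 3).
theorem mem_runLens_iff (code : String) (k : Int) (hk : 1 ≤ k) :
    (k ∈ runLens code) ↔ ∃ c ∈ code.toList, (code.toList.count c : Int) = k := by
  unfold runLens
  have hperm : (PySem.List.sorted code.toList (fun c => c) false).Perm code.toList :=
    PySem.List.sorted_perm _ _ _
  have hpair : (PySem.List.sorted code.toList (fun c => c) false).Pairwise (· ≤ ·) :=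
    PySem.List.sorted_pairwise _ _
  rcases hsort : PySem.List.sorted code.toList (fun c => c) false with _ | ⟨c, t⟩
  · -- sorted empty → code empty
    rw [hsort] at hperm
    have hnil : code.toList = [] := hperm.symm.eq_nil
    simp [hnil, runFinish, PySem.Set.empty]
  · rw [hsort] at hperm hpair
    have hstep : runStep (PySem.Set.empty, 0, (none : Option Char)) c
        = (PySem.Set.empty, 1, some c) := by
      simp [runStep, PySem.Set.empty]
    rw [List.foldl_cons, hstep,
      runLoop_spec t hpair.of_cons PySem.Set.empty 1 c le_rfl
        (fun x hx => List.rel_of_pairwise_cons hpair hx) k]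
    have hmemeq : ∀ d, d ∈ code.toList ↔ d ∈ c :: t := fun d => (hperm.mem_iff).symm
    have hcnteq : ∀ d, code.toList.count d = (c :: t).count d := fun d => (hperm.count_eq d).symm
    constructor
    · rintro (h | rfl | ⟨d, hd, hdc, rfl⟩)
      · simp [PySem.Set.empty] at h
      · exact ⟨c, (hmemeq c).mpr List.mem_cons_self,
          by rw [hcnteq]; simp only [List.count_cons_self]; omega⟩
      · exact ⟨d, (hmemeq d).mpr (List.mem_cons_of_mem _ hd),
          by rw [hcnteq]; simp [Ne.symm hdc]⟩
    · rintro ⟨d, hd, rfl⟩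
      rw [hcnteq d]
      by_cases hdc : d = c
      · subst hdc
        refine Or.inr (Or.inl ?_)
        simp only [List.count_cons_self]
        omega
      · rcases List.mem_cons.mp ((hmemeq d).mp hd) with rfl | hd'
        · exact absurd rfl hdc
        · exact Or.inr (Or.inr ⟨d, hd', hdc,
            by simp [Ne.symm hdc]⟩)

-- per code, A's membership tests and B's coincide for k = 2 and k = 3
theorem mem_eq_23 (code : String) (k : Int) (hk : 1 ≤ k) :
    (k ∈ PySem.Set.ofList (PySem.Dict.counter code.toList).values) ↔ k ∈ runLens code := by
  rw [mem_counter_values_iff, mem_runLens_iff code k hk]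

-- the two accumulator loops agree from any start state
theorem foldl_eq (codes : List String) (acc : Int × Int) :
    codes.foldl (fun (acc : Int × Int) code =>
      let counts := PySem.Set.ofList (PySem.Dict.counter code.toList).values
      let acc := if (3 : Int) ∈ counts then (acc.1, acc.2 + 1) else acc
      let acc := if (2 : Int) ∈ counts then (acc.1 + 1, acc.2) else acc
      acc) acc
    = codes.foldl (fun (acc : Int × Int) code =>
      let lens := runLens code
      let acc := if (2 : Int) ∈ lens then (acc.1 + 1, acc.2) else acc
      let acc := if (3 : Int) ∈ lens then (acc.1, acc.2 + 1) else acc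
      acc) acc := by
  induction codes generalizing acc with
  | nil => rfl
  | cons c cs ih =>
    simp only [List.foldl_cons]
    rw [← ih]
    congr 1
    have h2 := mem_eq_23 c 2 (by norm_num)
    have h3 := mem_eq_23 c 3 (by norm_num)
    by_cases m2 : (2 : Int) ∈ runLens c <;> by_cases m3 : (3 : Int) ∈ runLens c <;>
      simp [h2, h3, m2, m3]

-- ===== VERDICT (by name: the statement is the Claim_ definition above) =====
theorem part_1_spec : Claim_equal_part_1 := by
  intro codes _
  unfold Spec_part_1 part_1 part_1_alt
  rw [foldl_eq]
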